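-- pv_equiv track=rewrite | github.com/Verochi/ShareScanAgent | PrivacyAgent-v1/ASTsharing.py | split_ast_into_parts
-- ===== SOURCE A (Python) =====
-- from typing import List, Optional, Dict, Any
--
-- def split_ast_into_parts(lines: List[str], n: int = 2) -> List[str]:
--     """
--     将AST文本均匀分割成N个部分，返回分片后的字符串列表
--
--     Args:
--         lines: AST的原始行列表
--         n: 要分割成的份数 (必须≥1)
--
--     Returns:
--         包含N个分片的列表，每个分片是字符串
--
--     Raises:
--         ValueError: 如果n不是正整数或大于总行数
--     """
--     if not isinstance(n, int) or n < 1: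
--         raise ValueError(f"n必须是正整数，输入为{n}")
--
--     if not lines:
--         return [""] * n  # 返回N个空字符串
--
--     total_lines = len(lines)
--     if n > total_lines:
--         raise ValueError(f"n({n})不能大于总行数({total_lines})")
--
--     part_size = total_lines // n
--     result = []
--
--     for i in range(n):
--         start = i * part_size
--         # 最后一部分包含剩余行
--         end = (i + 1) * part_size if i != n - 1 else total_lines
--         result.append(''.join(lines[start:end]))
--
--     return result
-- ===== SOURCE B (Python) =====
-- def split_ast_into_parts(lines, n=2):
--     if not isinstance(n, int) or n < 1:
--         raise ValueError(f"n必须是正整数，输入为{n}")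
--
--     if not lines:
--         return [""] * n
--
--     total_lines = len(lines)
--     if n > total_lines:
--         raise ValueError(f"n({n})不能大于总行数({total_lines})")
--
--     part_size = total_lines // n
--     # one pass: drop each line into its bucket instead of slicing per part
--     buckets = {}
--     for idx, line in enumerate(lines):
--         buckets.setdefault(min(idx // part_size, n - 1), []).append(line)
--     return [''.join(buckets.get(i, [])) for i in range(n)]
-- ===== Notes on version B (the rewrite author's own statement) =====
-- stated objective: alternative
-- what changed: Replaces the per-part slicing loop (compute start/end, slice, join for each of the n parts) by a single pass over enumerate(lines) that drops each line into a dict bucket keyed by min(idx // part_size, n - 1), then joins the n buckets.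
import Mathlib
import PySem

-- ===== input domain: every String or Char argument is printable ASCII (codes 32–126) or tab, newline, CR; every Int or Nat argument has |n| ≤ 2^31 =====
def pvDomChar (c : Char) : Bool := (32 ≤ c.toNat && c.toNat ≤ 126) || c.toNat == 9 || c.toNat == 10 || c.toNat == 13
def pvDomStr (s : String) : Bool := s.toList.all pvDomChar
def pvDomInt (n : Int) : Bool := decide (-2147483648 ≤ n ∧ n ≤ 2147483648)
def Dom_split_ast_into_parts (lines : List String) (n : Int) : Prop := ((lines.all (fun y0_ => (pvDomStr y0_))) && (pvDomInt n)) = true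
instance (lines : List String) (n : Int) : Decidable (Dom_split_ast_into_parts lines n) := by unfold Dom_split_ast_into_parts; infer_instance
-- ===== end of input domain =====

-- B replaces A's per-part slicing loop by one bucketing pass over enumerate(lines)
-- into a dict keyed by min(idx // part_size, n-1), then joins the n buckets (alternative decomposition, same cost).

-- ===== PORT A =====
def split_ast_into_parts (lines : List String) (n : Int) : List String :=
  if n < 1 then []                        -- Python: raise ValueError (excluded by Pre_)
  else if lines = [] then List.replicate n.toNat ""
  else
    let total : Int := lines.length
    if n > total then []                  -- Python: raise ValueError (excluded by Pre_)
    else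
      let part_size := PySem.Int.floordiv total n
      (PySem.List.pyRange 0 n 1).foldl
        (fun result i =>
          let start := i * part_size
          let e := if i ≠ n - 1 then (i + 1) * part_size else total
          result ++ [PySem.Str.join "" (PySem.List.slice lines (some start) (some e))]) []

-- ===== PORT B =====
def split_ast_into_parts_alt (lines : List String) (n : Int) : List String :=
  if n < 1 then []                        -- Python: raise ValueError (excluded by Pre_)
  else if lines = [] then List.replicate n.toNat ""
  else
    let total : Int := lines.length
    if n > total then []                  -- Python: raise ValueError (excluded by Pre_)
    else
      let part_size := PySem.Int.floordiv total n
      let buckets := (PySem.List.enumerate lines 0).foldl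
        (fun d p => d.modify (min (PySem.Int.floordiv p.1 part_size) (n - 1)) [] (· ++ [p.2]))
        PySem.Dict.empty
      (PySem.List.pyRange 0 n 1).map (fun i => PySem.Str.join "" (buckets.getD i []))

-- ===== PRECONDITION & SPEC =====
-- Pre_ excludes exactly the inputs on which A raises ValueError: n < 1, or n greater than the
-- number of lines (when lines is nonempty).
def Pre_split_ast_into_parts (lines : List String) (n : Int) : Prop :=
  1 ≤ n ∧ (lines = [] ∨ n ≤ (lines.length : Int))
instance (lines : List String) (n : Int) : Decidable (Pre_split_ast_into_parts lines n) := by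
  unfold Pre_split_ast_into_parts; infer_instance
def pvWitness_split_ast_into_parts : List String × Int := (["a\n", "b\n", "c\n"], 2)

def Spec_split_ast_into_parts (lines : List String) (n : Int) (out : List String) : Prop := out = split_ast_into_parts_alt lines n
instance (lines : List String) (n : Int) (out : List String) : Decidable (Spec_split_ast_into_parts lines n out) := by unfold Spec_split_ast_into_parts; infer_instance

-- ===== CLAIM (what is proved, stated in full; the proofs are below) =====
def Claim_equal_split_ast_into_parts : Prop := ∀ (lines : List String) (n : Int), Dom_split_ast_into_parts lines n → Pre_split_ast_into_parts lines n → Spec_split_ast_into_parts lines n (split_ast_into_parts lines n)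

-- ===== LEMMAS AND PROOFS =====

-- shifting the start of enumerate by one
theorem pv_enum_shift {α : Type} (xs : List α) (s : Int) :
    PySem.List.enumerate xs (s + 1) = (PySem.List.enumerate xs s).map (fun p => (p.1 + 1, p.2)) := by
  induction xs generalizing s with
  | nil => simp [PySem.List.enumerate_nil]
  | cons x xs ih => simp [PySem.List.enumerate_cons, ih]

-- filtering enumerate by an index interval is a drop/take
theorem pv_filter_enum_interval {α : Type} (xs : List α) (lo hi : Nat) :
    ((PySem.List.enumerate xs 0).filter
        (fun p => decide ((lo : Int) ≤ p.1 ∧ p.1 < (hi : Int)))).map (·.2)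
      = (xs.drop lo).take (hi - lo) := by
  induction xs generalizing lo hi with
  | nil => simp [PySem.List.enumerate_nil]
  | cons x xs ih =>
    have hshift : PySem.List.enumerate xs (0 + 1) = (PySem.List.enumerate xs 0).map (fun p => (p.1 + 1, p.2)) :=
      pv_enum_shift xs 0
    rw [PySem.List.enumerate_cons, hshift]
    have hcongr :
        ((PySem.List.enumerate xs 0).map (fun p => (p.1 + 1, p.2))).filter
            (fun p => decide ((lo : Int) ≤ p.1 ∧ p.1 < (hi : Int)))
          = ((PySem.List.enumerate xs 0).filter
              (fun p => decide (((lo - 1 : Nat) : Int) ≤ p.1 ∧ p.1 < ((hi - 1 : Nat) : Int)))).map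
              (fun p => (p.1 + 1, p.2)) := by
      rw [List.filter_map]
      congr 1
      apply List.filter_congr
      intro p hp
      obtain ⟨k, hk, rfl⟩ := (PySem.List.mem_enumerate_iff xs 0 p).mp hp
      simp only [Function.comp, decide_eq_decide]
      omega
    rw [List.filter_cons, hcongr]
    by_cases hhead : (lo : Int) ≤ ((0 : Int)) ∧ ((0 : Int)) < (hi : Int)
    · have hlo : lo = 0 := by omega
      have hhi : 0 < hi := by exact_mod_cast hhead.2
      simp only [show decide ((lo : Int) ≤ ((0 : Int), x).1 ∧ ((0 : Int), x).1 < (hi : Int)) = true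
        from by simpa using hhead, if_true, List.map_cons, List.map_map]
      have : ((PySem.List.enumerate xs 0).filter
              (fun p => decide (((lo - 1 : Nat) : Int) ≤ p.1 ∧ p.1 < ((hi - 1 : Nat) : Int)))).map
              ((·.2) ∘ (fun p : Int × α => (p.1 + 1, p.2)))
          = (xs.drop (lo - 1)).take (hi - 1 - (lo - 1)) := by
        rw [show ((·.2) ∘ (fun p : Int × α => (p.1 + 1, p.2))) = (fun p : Int × α => p.2) from rfl]
        exact ih (lo - 1) (hi - 1)
      rw [this]
      subst hlo
      simp
      cases hi with
      | zero => omega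
      | succ m => simp
    · simp only [show decide ((lo : Int) ≤ ((0 : Int), x).1 ∧ ((0 : Int), x).1 < (hi : Int)) = false
        from by simpa using hhead, Bool.false_eq_true, if_false, List.map_map]
      have : ((PySem.List.enumerate xs 0).filter
              (fun p => decide (((lo - 1 : Nat) : Int) ≤ p.1 ∧ p.1 < ((hi - 1 : Nat) : Int)))).map
              ((·.2) ∘ (fun p : Int × α => (p.1 + 1, p.2)))
          = (xs.drop (lo - 1)).take (hi - 1 - (lo - 1)) := by
        rw [show ((·.2) ∘ (fun p : Int × α => (p.1 + 1, p.2))) = (fun p : Int × α => p.2) from rfl]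
        exact ih (lo - 1) (hi - 1)
      rw [this]
      have hlo : 0 < lo ∨ hi = 0 := by
        by_contra h
        push Not at h
        exact hhead ⟨by omega, by omega⟩
      rcases hlo with h | h
      · rcases Nat.exists_eq_add_of_lt h with ⟨m, rfl⟩
        simp only [List.drop_succ_cons]
        congr 1; omega
      · subst h; simp

-- which bucket index k lands in, as an index interval
theorem pv_min_div (psn N I k len : Nat) (h1 : 0 < psn) (h2 : I < N) (h3 : k < len) :
    min (k / psn) (N - 1) = I ↔ (I * psn ≤ k ∧ k < if I = N - 1 then len else (I + 1) * psn) := by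
  by_cases hc : I = N - 1
  · simp only [hc, if_true]
    constructor
    · intro h
      exact ⟨(Nat.le_div_iff_mul_le h1).mp (min_eq_right_iff.mp h), h3⟩
    · rintro ⟨h4, -⟩
      exact min_eq_right_iff.mpr ((Nat.le_div_iff_mul_le h1).mpr h4)
  · simp only [hc, if_false]
    have hlt : I < N - 1 := by omega
    constructor
    · intro h
      have hdiv : k / psn = I := by
        rcases le_total (k / psn) (N - 1) with hle | hle
        · rwa [min_eq_left hle] at h
        · rw [min_eq_right hle] at h; omega
      exact ⟨(Nat.le_div_iff_mul_le h1).mp (by omega),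
        (Nat.div_lt_iff_lt_mul h1).mp (by omega)⟩
    · rintro ⟨h4, h5⟩
      have hge : I ≤ k / psn := (Nat.le_div_iff_mul_le h1).mpr h4
      have hltd : k / psn < I + 1 := (Nat.div_lt_iff_lt_mul h1).mpr h5
      have hdiv : k / psn = I := by omega
      rw [hdiv]
      exact min_eq_left (by omega)

-- bucket I of B's dict is exactly A's slice for part I
theorem pv_bucket (lines : List String) (N I : Nat) (hN : 1 ≤ N) (hNlen : N ≤ lines.length)
    (hIN : I < N) :
    (((PySem.List.enumerate lines 0).foldl
        (fun d p => d.modify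
          (min (PySem.Int.floordiv p.1 (PySem.Int.floordiv ((lines.length : Nat) : Int) ((N : Nat) : Int))) (((N : Nat) : Int) - 1)) []
          (· ++ [p.2]))
        PySem.Dict.empty).getD ((I : Nat) : Int) [])
      = PySem.List.slice lines
          (some (((I : Nat) : Int) * PySem.Int.floordiv ((lines.length : Nat) : Int) ((N : Nat) : Int)))
          (some (if ((I : Nat) : Int) ≠ ((N : Nat) : Int) - 1
                 then (((I : Nat) : Int) + 1) * PySem.Int.floordiv ((lines.length : Nat) : Int) ((N : Nat) : Int)
                 else ((lines.length : Nat) : Int))) := by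
  have hps : PySem.Int.floordiv ((lines.length : Nat) : Int) ((N : Nat) : Int)
      = ((lines.length / N : Nat) : Int) := PySem.Int.floordiv_natCast lines.length N
  rw [hps]
  have hpsn1 : 1 ≤ lines.length / N := (Nat.one_le_div_iff (by omega)).mpr hNlen
  -- the fold with a computed key is the simple-key fold over the mapped list
  rw [show (PySem.List.enumerate lines 0).foldl
        (fun d p => d.modify
          (min (PySem.Int.floordiv p.1 ((lines.length / N : Nat) : Int)) (((N : Nat) : Int) - 1)) []
          (· ++ [p.2]))
        PySem.Dict.empty
      = ((PySem.List.enumerate lines 0).map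
          (fun p => (min (PySem.Int.floordiv p.1 ((lines.length / N : Nat) : Int)) (((N : Nat) : Int) - 1), p.2))).foldl
          (fun d p => d.modify p.1 [] (· ++ [p.2])) PySem.Dict.empty
      from by rw [List.foldl_map]]
  rw [PySem.Dict.getD_foldl_modify_append]
  rw [List.filter_map, List.map_map]
  have hempty : (PySem.Dict.empty : PySem.Dict Int (List String)).getD ((I : Nat) : Int) [] = [] := by
    simp [PySem.Dict.getD, PySem.Dict.get?, PySem.Dict.empty]
  rw [hempty, List.nil_append]
  -- rewrite the filter predicate into an index interval
  have hfc : (PySem.List.enumerate lines 0).filter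
        ((fun p : Int × String => p.1 == ((I : Nat) : Int)) ∘
          (fun p => (min (PySem.Int.floordiv p.1 ((lines.length / N : Nat) : Int)) (((N : Nat) : Int) - 1), p.2)))
      = (PySem.List.enumerate lines 0).filter
        (fun p => decide (((I * (lines.length / N) : Nat) : Int) ≤ p.1 ∧
          p.1 < (((if I = N - 1 then lines.length else (I + 1) * (lines.length / N)) : Nat) : Int))) := by
    apply List.filter_congr
    intro p hp
    obtain ⟨k, hk, rfl⟩ := (PySem.List.mem_enumerate_iff lines 0 p).mp hp
    simp only [Function.comp, zero_add, PySem.Int.floordiv_natCast]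
    rw [show ((N : Nat) : Int) - 1 = ((N - 1 : Nat) : Int) from by omega]
    rw [← Nat.cast_min]
    rw [show ((↑(min (k / (lines.length / N)) (N - 1)) : Int) == (↑I : Int))
        = decide ((↑(min (k / (lines.length / N)) (N - 1)) : Int) = (↑I : Int)) from rfl]
    rw [decide_eq_decide, Int.natCast_inj,
      pv_min_div (lines.length / N) N I k lines.length (by omega) hIN hk]
    constructor <;> (rintro ⟨h4, h5⟩; exact ⟨by exact_mod_cast h4, by exact_mod_cast h5⟩)
  rw [show ((fun x : Int × String => x.2) ∘
        (fun p : Int × String => (min (PySem.Int.floordiv p.1 ((lines.length / N : Nat) : Int)) (((N : Nat) : Int) - 1), p.2)))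
      = (fun p : Int × String => p.2) from rfl]
  rw [hfc, pv_filter_enum_interval]
  -- now the slice side
  by_cases hc : I = N - 1
  · rw [if_neg (by omega : ¬ ((I : Nat) : Int) ≠ ((N : Nat) : Int) - 1)]
    rw [show ((I : Nat) : Int) * ((lines.length / N : Nat) : Int) = ((I * (lines.length / N) : Nat) : Int) from by push_cast; ring]
    rw [PySem.List.slice_natCast]
    simp only [hc, if_true]
  · rw [if_pos (by omega : ((I : Nat) : Int) ≠ ((N : Nat) : Int) - 1)]
    rw [show ((I : Nat) : Int) * ((lines.length / N : Nat) : Int) = ((I * (lines.length / N) : Nat) : Int) from by push_cast; ring]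
    rw [show (((I : Nat) : Int) + 1) * ((lines.length / N : Nat) : Int) = (((I + 1) * (lines.length / N) : Nat) : Int) from by push_cast; ring]
    rw [PySem.List.slice_natCast]
    simp only [hc, if_false]

theorem split_ast_into_parts_spec : Claim_equal_split_ast_into_parts := by
  intro lines n _ hpre
  obtain ⟨hn, hcase⟩ := hpre
  unfold Spec_split_ast_into_parts split_ast_into_parts split_ast_into_parts_alt
  rcases hcase with hnil | hlen
  · simp [hnil]
  · have h1 : ¬ n < 1 := by omega
    by_cases hnil : lines = []
    · simp [hnil]
    · have h3 : ¬ n > (lines.length : Int) := by omega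
      simp only [h1, if_false, hnil, if_neg h3]
      rw [PySem.List.foldl_append_singleton_eq_map, List.nil_append]
      apply List.map_congr_left
      intro i hi
      rw [PySem.List.mem_pyRange_one] at hi
      obtain ⟨N, rfl⟩ : ∃ N : Nat, n = (N : Int) := ⟨n.toNat, (Int.toNat_of_nonneg (by omega)).symm⟩
      obtain ⟨I, rfl⟩ : ∃ I : Nat, i = (I : Int) := ⟨i.toNat, (Int.toNat_of_nonneg (by omega)).symm⟩
      have := pv_bucket lines N I (by exact_mod_cast hn) (by exact_mod_cast hlen) (by exact_mod_cast hi.2)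
      rw [this]
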